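-- pv_equiv track=rewrite | github.com/SanjayJohnson02/hearthstone | hearthstone project.py | validList
-- ===== SOURCE A (Python) =====
-- def validList(lineup, decks):
--     classList = ['Death Knight', 'Demon Hunter', 'Druid', 'Mage', 'Paladin', 'Priest', 'Warlock', 'Warrior', 'Rogue',
--         'Hunter', 'Shaman']
--     if len(lineup) != 4:
--         return False
--     for name in classList:
--
--         count = 0
--         for deck in lineup:
--
--             if deck not in decks:
--                 return False
--             if name in deck:
--                 count += 1
--                 if name == 'Hunter' and 'Demon Hunter' in deck:
--                     count -= 1
--         if count > 1:
--             return False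
--     return True
-- ===== SOURCE B (Python) =====
-- def _pairwiseDisjoint(tags):
--     if not tags:
--         return True
--     head, rest = tags[0], tags[1:]
--     return all(head.isdisjoint(t) for t in rest) and _pairwiseDisjoint(rest)
--
--
-- def validList(lineup, decks):
--     classList = ['Death Knight', 'Demon Hunter', 'Druid', 'Mage', 'Paladin', 'Priest', 'Warlock', 'Warrior', 'Rogue',
--         'Hunter', 'Shaman']
--     if len(lineup) != 4:
--         return False
--     if any(deck not in decks for deck in lineup):
--         return False
--     tags = [{name for name in classList
--              if name in deck and not (name == 'Hunter' and 'Demon Hunter' in deck)}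
--             for deck in lineup]
--     return _pairwiseDisjoint(tags)
-- ===== Notes on version B (the rewrite author's own statement) =====
-- stated objective: alternative
-- what changed: Instead of A's 11 per-class counting passes over the lineup, B computes each deck's set of matched classes once and accepts iff these four sets are pairwise disjoint, checked by a recursive head-vs-rest disjointness sweep; no class is ever counted.
import Mathlib
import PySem

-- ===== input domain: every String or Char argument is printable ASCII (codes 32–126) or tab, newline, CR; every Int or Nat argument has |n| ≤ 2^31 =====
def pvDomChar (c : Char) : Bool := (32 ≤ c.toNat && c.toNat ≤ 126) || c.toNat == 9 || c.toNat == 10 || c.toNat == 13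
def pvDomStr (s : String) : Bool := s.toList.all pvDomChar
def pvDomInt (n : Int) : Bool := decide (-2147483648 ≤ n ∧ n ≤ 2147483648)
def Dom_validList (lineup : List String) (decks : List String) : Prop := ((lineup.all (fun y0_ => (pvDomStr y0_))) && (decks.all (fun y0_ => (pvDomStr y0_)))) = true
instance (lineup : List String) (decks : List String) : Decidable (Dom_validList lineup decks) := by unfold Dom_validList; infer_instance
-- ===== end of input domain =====

-- B replaces A's 11 per-class counting passes by computing each deck's set of matched
-- classes once and checking the four sets pairwise disjoint via a recursive head-vs-rest
-- sweep (alternative algorithm; same result, no counting).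


-- ===== PORT A =====
-- the literal classList both Pythons write out
def pvClassList : List String :=
  ["Death Knight", "Demon Hunter", "Druid", "Mage", "Paladin", "Priest", "Warlock", "Warrior",
   "Rogue", "Hunter", "Shaman"]

-- A's inner 'for deck in lineup' loop; none = the early 'return False' on 'deck not in decks'
def validListInner (name : String) (decks : List String) : List String → Int → Option Int
  | [], count => some count
  | deck :: rest, count =>
    if !(decks.contains deck) then none
    else
      let count1 :=
        if PySem.Str.isIn name deck then
          let c := count + 1
          if name == "Hunter" && PySem.Str.isIn "Demon Hunter" deck then c - 1 else c
        else count
      validListInner name decks rest count1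

-- A's outer 'for name in classList' loop
def validListOuter (lineup : List String) (decks : List String) : List String → Bool
  | [] => true
  | name :: rest =>
    match validListInner name decks lineup 0 with
    | none => false
    | some count => if count > 1 then false else validListOuter lineup decks rest

def validList (lineup : List String) (decks : List String) : Bool :=
  if lineup.length ≠ 4 then false
  else validListOuter lineup decks pvClassList

-- ===== PORT B =====
-- B's set-comprehension filter: 'name in deck and not (name == "Hunter" and "Demon Hunter" in deck)'
def pvMatchCond (name : String) (deck : String) : Bool :=
  PySem.Str.isIn name deck && !(name == "Hunter" && PySem.Str.isIn "Demon Hunter" deck)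

-- the set of classes a deck matches ('{name for name in classList if …}')
def pvTag (deck : String) : PySem.Set String :=
  PySem.Set.ofList (pvClassList.filter (fun name => pvMatchCond name deck))

-- B's helper '_pairwiseDisjoint': head disjoint from each of the rest, then recurse
def pvPairwiseDisjoint : List (PySem.Set String) → Bool
  | [] => true
  | head :: rest => rest.all (fun t => PySem.Set.isdisjoint head t) && pvPairwiseDisjoint rest

def validList_alt (lineup : List String) (decks : List String) : Bool :=
  if lineup.length ≠ 4 then false
  else if lineup.any (fun deck => !(decks.contains deck)) then false
  else pvPairwiseDisjoint (lineup.map pvTag)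

-- ===== PRECONDITION & SPEC =====
def Spec_validList (lineup : List String) (decks : List String) (out : Bool) : Prop := out = validList_alt lineup decks
instance (lineup : List String) (decks : List String) (out : Bool) : Decidable (Spec_validList lineup decks out) := by unfold Spec_validList; infer_instance

-- ===== CLAIM (what is proved, stated in full; the proofs are below) =====
def Claim_equal_validList : Prop := ∀ (lineup : List String) (decks : List String), Dom_validList lineup decks → Spec_validList lineup decks (validList lineup decks)

-- ===== LEMMAS AND PROOFS =====

-- A's step updates the net count by B's filter condition
theorem pvStep_eq (name deck : String) (c : Int) :
    (if PySem.Str.isIn name deck then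
       let cc := c + 1
       if name == "Hunter" && PySem.Str.isIn "Demon Hunter" deck then cc - 1 else cc
     else c) = c + (if pvMatchCond name deck then 1 else 0) := by
  unfold pvMatchCond
  cases hin : PySem.Str.isIn name deck <;>
    cases hh : (name == "Hunter" && PySem.Str.isIn "Demon Hunter" deck) <;>
      simp only [hin, hh, Bool.not_true, Bool.not_false, Bool.and_true,
        Bool.and_false, if_true, if_false, Bool.false_eq_true] <;> try ring

-- A's inner loop: early exit iff some deck is missing; otherwise net count = #matching decks
theorem validListInner_eq (name : String) (decks : List String) :
    ∀ (lineup : List String) (c : Int),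
      validListInner name decks lineup c =
        if lineup.all (fun d => decks.contains d) then
          some (c + (lineup.countP (fun d => pvMatchCond name d) : Int))
        else none := by
  intro lineup
  induction lineup with
  | nil => intro c; simp [validListInner]
  | cons deck rest ih =>
    intro c
    rw [validListInner]
    cases hd : decks.contains deck with
    | false =>
      have hd' : deck ∉ decks := by simpa using hd
      simp [List.all_cons, hd']
    | true =>
      simp only [List.all_cons, hd, Bool.true_and, Bool.not_true, Bool.false_eq_true,
        if_false, ih, pvStep_eq, List.countP_cons]
      cases hall : rest.all (fun d => decks.contains d) with
      | false => simp
      | true =>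
        simp only [if_true, Option.some.injEq]
        cases hm : pvMatchCond name deck <;> simp <;> try push_cast ; try ring

-- A's outer loop when every deck of the lineup is present in decks
theorem validListOuter_all (lineup decks : List String)
    (h : lineup.all (fun d => decks.contains d) = true) :
    ∀ names : List String,
      validListOuter lineup decks names =
        names.all (fun name => decide (lineup.countP (fun d => pvMatchCond name d) ≤ 1)) := by
  intro names
  induction names with
  | nil => simp [validListOuter]
  | cons name rest ih =>
    rw [validListOuter, validListInner_eq, h]
    simp only [if_true, List.all_cons, ih]
    by_cases hc : lineup.countP (fun d => pvMatchCond name d) ≤ 1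
    · have h1 : ¬ ((0 : Int) + (lineup.countP (fun d => pvMatchCond name d) : Int) > 1) := by
        omega
      simp [hc]
    · have h1 : ((0 : Int) + (lineup.countP (fun d => pvMatchCond name d) : Int) > 1) := by
        omega
      simp [hc]

-- A's outer loop when some deck is missing (classList is nonempty)
theorem validListOuter_missing (lineup decks : List String)
    (h : lineup.all (fun d => decks.contains d) = false)
    (name : String) (rest : List String) :
    validListOuter lineup decks (name :: rest) = false := by
  rw [validListOuter, validListInner_eq, h]
  simp

-- B's recursion is exactly List.Pairwise of Boolean disjointness
theorem pvPairwiseDisjoint_iff (ts : List (PySem.Set String)) :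
    pvPairwiseDisjoint ts = true ↔ ts.Pairwise (fun s t => PySem.Set.isdisjoint s t = true) := by
  induction ts with
  | nil => simp [pvPairwiseDisjoint]
  | cons head rest ih =>
    rw [pvPairwiseDisjoint, List.pairwise_cons, Bool.and_eq_true, List.all_eq_true, ih]

-- disjointness of two tag sets, unfolded to the match conditions
theorem isdisjoint_tag_iff (d1 d2 : String) :
    PySem.Set.isdisjoint (pvTag d1) (pvTag d2) = true ↔
      ∀ n ∈ pvClassList, ¬(pvMatchCond n d1 = true ∧ pvMatchCond n d2 = true) := by
  unfold pvTag
  rw [PySem.Set.isdisjoint_iff]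
  constructor
  · intro h n hn ⟨h1, h2⟩
    exact h n ((PySem.Set.mem_ofList _ _).mpr (List.mem_filter.mpr ⟨hn, h1⟩))
      ((PySem.Set.mem_ofList _ _).mpr (List.mem_filter.mpr ⟨hn, h2⟩))
  · intro h n hn1 hn2
    have m1 := List.mem_filter.mp ((PySem.Set.mem_ofList _ _).mp hn1)
    have m2 := List.mem_filter.mp ((PySem.Set.mem_ofList _ _).mp hn2)
    exact h n m1.1 ⟨m1.2, m2.2⟩

-- a Boolean predicate holds at most once on a list iff no two positions both satisfy it
theorem countP_le_one_iff {α : Type} (p : α → Bool) (L : List α) :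
    L.countP p ≤ 1 ↔ L.Pairwise (fun a b => ¬(p a = true ∧ p b = true)) := by
  induction L with
  | nil => simp
  | cons a l ih =>
    rw [List.countP_cons, List.pairwise_cons]
    cases hp : p a with
    | false =>
      simp only [hp, Bool.false_eq_true, if_false, Nat.add_zero, ih]
      constructor
      · intro h; exact ⟨fun b _ ⟨hfa, _⟩ => by simp at hfa, h⟩
      · exact fun h => h.2
    | true =>
      simp only [hp, if_true]
      constructor
      · intro h
        have h0 : l.countP p = 0 := by omega
        have hz := List.countP_eq_zero.mp h0
        exact ⟨fun b hb ⟨_, hpb⟩ => by simp [hz b hb] at hpb, ih.mp (by omega)⟩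
      · rintro ⟨h1, _⟩
        have h0 : l.countP p = 0 := List.countP_eq_zero.mpr (fun b hb => by
          intro hpb; exact h1 b hb ⟨by simp [hp], hpb⟩)
        omega

-- Pairwise commutes with a bounded universal quantifier
theorem pairwise_forall_swap {α β : Type} (L : List α) (cls : List β) (Q : β → α → α → Prop) :
    (L.Pairwise fun a b => ∀ n ∈ cls, Q n a b) ↔ ∀ n ∈ cls, L.Pairwise (Q n) := by
  simp only [List.pairwise_iff_getElem]
  constructor
  · intro h n hn i j hi hj hij
    exact h i j hi hj hij n hn
  · intro h i j hi hj hij n hn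
    exact h n hn i j hi hj hij

-- ===== VERDICT (by name: the statement is the Claim_ definition above) =====
theorem validList_spec : Claim_equal_validList := by
  intro lineup decks _
  unfold Spec_validList validList validList_alt
  by_cases hlen : lineup.length = 4
  · simp only [hlen, ne_eq, not_true_eq_false, if_false]
    by_cases hall : lineup.all (fun d => decks.contains d) = true
    · have hany : lineup.any (fun deck => !(decks.contains deck)) = false := by
        simp only [List.all_eq_true] at hall
        simp only [List.any_eq_false, Bool.not_eq_true]
        intro d hd
        simpa using hall d hd
      rw [hany, if_neg (by simp)]
      rw [validListOuter_all lineup decks hall]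
      rw [Bool.eq_iff_iff, pvPairwiseDisjoint_iff, List.pairwise_map]
      simp only [List.all_eq_true, decide_eq_true_eq, isdisjoint_tag_iff]
      rw [pairwise_forall_swap]
      constructor
      · intro h n hn
        exact (countP_le_one_iff _ _).mp (h n hn)
      · intro h n hn
        exact (countP_le_one_iff _ _).mpr (h n hn)
    · have hany : lineup.any (fun deck => !(decks.contains deck)) = true := by
        simp only [List.all_eq_true] at hall
        rcases not_forall.mp hall with ⟨d, hd'⟩
        rcases Classical.not_imp.mp hd' with ⟨hd, hnd⟩
        exact List.any_eq_true.mpr ⟨d, hd, by simpa using hnd⟩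
      rw [hany, if_pos rfl]
      exact validListOuter_missing lineup decks (by simpa using hall) _ _
  · simp [hlen]
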